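-- pv_equiv track=rewrite | github.com/roychowdhuryresearch/CNL-VC | NeuralVision/neural_correlation/preformance.py | get_fp_correlation
-- ===== SOURCE A (Python) =====
-- def get_fp_correlation(character_stats, character_prediction):
--     res = {}
--     for character_index in sorted(character_stats.keys()):
--         res[character_index] = {}
--         for character_index_cond in sorted(character_stats.keys()):
--             res[character_index][character_index_cond] = []
--
--     for character_index in sorted(character_stats.keys()):
--         one_character_stats = character_stats[character_index]
--         for frame_number in one_character_stats.keys():
--             one_frame_stats = one_character_stats[frame_number]
--             if one_frame_stats[-2] == 1: #FP
--                 for character_index_cond in sorted(character_stats.keys()):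
--                     res[character_index][character_index_cond].append(character_prediction[character_index_cond][frame_number])
--     return res
-- ===== SOURCE B (Python) =====
-- def get_fp_correlation(character_stats, character_prediction):
--     keys = sorted(character_stats.keys())
--     # FP frame tuple per character, computed once in a first pass
--     fp = {ci: tuple(f for f, st in character_stats[ci].items() if st[-2] == 1)
--           for ci in keys}
--     # rows are a pure function of the FP frame tuple, so memoize distinct rows:
--     # characters sharing the same FP frames (e.g. none) get their row built once
--     row_cache = {}
--     res = {}
--     for ci in keys:
--         frames = fp[ci]
--         if frames not in row_cache:
--             row_cache[frames] = {cc: [character_prediction[cc][f] for f in frames]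
--                                  for cc in keys}
--         res[ci] = {cc: list(vals) for cc, vals in row_cache[frames].items()}
--     return res
-- ===== Notes on version B (the rewrite author's own statement) =====
-- stated objective: alternative
-- what changed: B replaces A's init-then-scatter-append over a pre-built nested dict by a staged pipeline with memoization: it first builds a map character -> FP-frame tuple, then fills rows through a cache keyed by that tuple, so a row (a pure function of the FP frames) is computed only once per distinct FP-frame tuple and copied for characters that share it, instead of being re-accumulated frame by frame for every character.
import Mathlib
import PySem

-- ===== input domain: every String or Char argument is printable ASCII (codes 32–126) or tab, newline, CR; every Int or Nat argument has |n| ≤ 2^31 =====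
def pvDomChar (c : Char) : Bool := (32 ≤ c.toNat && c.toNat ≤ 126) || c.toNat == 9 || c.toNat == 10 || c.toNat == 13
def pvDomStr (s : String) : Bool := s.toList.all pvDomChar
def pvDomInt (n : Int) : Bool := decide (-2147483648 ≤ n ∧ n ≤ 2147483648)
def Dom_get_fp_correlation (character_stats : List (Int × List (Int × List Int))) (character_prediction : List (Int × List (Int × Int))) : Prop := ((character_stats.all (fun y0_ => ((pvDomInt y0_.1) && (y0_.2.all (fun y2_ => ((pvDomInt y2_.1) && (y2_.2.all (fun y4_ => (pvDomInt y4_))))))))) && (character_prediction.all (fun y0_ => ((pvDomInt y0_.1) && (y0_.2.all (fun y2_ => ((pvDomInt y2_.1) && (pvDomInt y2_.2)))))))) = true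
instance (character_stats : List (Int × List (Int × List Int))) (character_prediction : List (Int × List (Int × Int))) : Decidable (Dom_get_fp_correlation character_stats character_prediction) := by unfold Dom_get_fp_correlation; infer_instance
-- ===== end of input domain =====

-- B is a staged pipeline with memoization: it first maps each character to its FP-frame tuple,
-- then builds each row once per DISTINCT tuple through a cache and copies it (objective: alternative).
-- dicts are modelled as PySem.Dict built from the association-list arguments.

-- ===== PORT A =====
def get_fp_correlation (character_stats : List (Int × List (Int × List Int))) (character_prediction : List (Int × List (Int × Int))) : List (Int × List (Int × List Int)) :=
  let S : PySem.Dict Int (List (Int × List Int)) := PySem.Dict.ofList character_stats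
  let P : PySem.Dict Int (List (Int × Int)) := PySem.Dict.ofList character_prediction
  let ks : List Int := PySem.List.sorted S.keys (fun x => x) false
  -- res = {}; for ci in sorted(keys): res[ci] = {}; for cc in sorted(keys): res[ci][cc] = []
  let res0 : PySem.Dict Int (PySem.Dict Int (List Int)) :=
    ks.foldl (fun r c =>
      r.insert c (ks.foldl (fun inner c' => inner.insert c' ([] : List Int)) PySem.Dict.empty))
      PySem.Dict.empty
  -- second pass: scatter-append per FP frame (getD defaults are unreachable under Pre_:
  -- every key looked up is present and every stats list has length ≥ 2 there)
  let res : PySem.Dict Int (PySem.Dict Int (List Int)) :=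
    ks.foldl (fun r c =>
      (PySem.Dict.ofList (S.getD c [])).items.foldl (fun r p =>
        if PySem.List.pyGet? p.2 (-2) = some 1 then
          ks.foldl (fun r c' =>
            r.modify c PySem.Dict.empty (fun inner =>
              inner.modify c' [] (fun l =>
                l ++ [(PySem.Dict.ofList (P.getD c' [])).getD p.1 0]))) r
        else r) r) res0
  res.items.map (fun q => (q.1, q.2.items))

-- ===== PORT B =====
def get_fp_correlation_alt (character_stats : List (Int × List (Int × List Int))) (character_prediction : List (Int × List (Int × Int))) : List (Int × List (Int × List Int)) :=
  let S : PySem.Dict Int (List (Int × List Int)) := PySem.Dict.ofList character_stats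
  let P : PySem.Dict Int (List (Int × Int)) := PySem.Dict.ofList character_prediction
  let ks : List Int := PySem.List.sorted S.keys (fun x => x) false
  -- fp = {ci: tuple(f for f, st in character_stats[ci].items() if st[-2] == 1) for ci in keys}
  let fp : PySem.Dict Int (List Int) :=
    ks.foldl (fun d ci => d.insert ci
      (((PySem.Dict.ofList (S.getD ci [])).items.filter
          (fun p => PySem.List.pyGet? p.2 (-2) = some 1)).map (fun p => p.1)))
      PySem.Dict.empty
  -- row_cache = {}; res = {}; for ci in keys: … (cache keyed by the FP-frame tuple)
  let final : (PySem.Dict (List Int) (PySem.Dict Int (List Int))) × (PySem.Dict Int (PySem.Dict Int (List Int))) :=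
    ks.foldl (fun st ci =>
      let frames := fp.getD ci []
      let cache :=
        if st.1.contains frames then st.1
        else st.1.insert frames
          -- row_cache[frames] = {cc: [character_prediction[cc][f] for f in frames] for cc in keys}
          (ks.foldl (fun row cc => row.insert cc
            (frames.map (fun f => (PySem.Dict.ofList (P.getD cc [])).getD f 0)))
            PySem.Dict.empty)
      -- res[ci] = {cc: list(vals) for cc, vals in row_cache[frames].items()}
      (cache, st.2.insert ci
        ((cache.getD frames PySem.Dict.empty).items.foldl
          (fun d q => d.insert q.1 q.2) PySem.Dict.empty)))
      (PySem.Dict.empty, PySem.Dict.empty)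
  final.2.items.map (fun q => (q.1, q.2.items))

-- ===== PRECONDITION & SPEC =====
-- Pre_ excludes exactly the inputs where Python A raises: a frame-stats list of length < 2
-- (IndexError on [-2]) or, when an FP frame exists, a cond character or that frame number
-- missing from character_prediction (KeyError).
def Pre_get_fp_correlation (character_stats : List (Int × List (Int × List Int))) (character_prediction : List (Int × List (Int × Int))) : Prop :=
  ∀ q ∈ (PySem.Dict.ofList character_stats).items,
    ∀ p ∈ (PySem.Dict.ofList (q.2 : List (Int × List Int))).items,
      2 ≤ (p.2 : List Int).length ∧
      (PySem.List.pyGet? p.2 (-2) = some 1 →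
        ∀ c' ∈ (PySem.Dict.ofList character_stats).keys,
          (PySem.Dict.ofList character_prediction).contains c' = true ∧
          (PySem.Dict.ofList ((PySem.Dict.ofList character_prediction).getD c' ([] : List (Int × Int)))).contains p.1 = true)
instance (character_stats : List (Int × List (Int × List Int))) (character_prediction : List (Int × List (Int × Int))) : Decidable (Pre_get_fp_correlation character_stats character_prediction) := by unfold Pre_get_fp_correlation; infer_instance

def pvWitness_get_fp_correlation : (List (Int × List (Int × List Int))) × (List (Int × List (Int × Int))) :=
  ([(0, [(3, [1, 1, 0]), (4, [0, 0, 1])]), (1, [(3, [1, 0, 0])])],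
   [(0, [(3, 5), (4, 7)]), (1, [(3, -2), (4, 0)])])

def Spec_get_fp_correlation (character_stats : List (Int × List (Int × List Int))) (character_prediction : List (Int × List (Int × Int))) (out : List (Int × List (Int × List Int))) : Prop := out = get_fp_correlation_alt character_stats character_prediction
instance (character_stats : List (Int × List (Int × List Int))) (character_prediction : List (Int × List (Int × Int))) (out : List (Int × List (Int × List Int))) : Decidable (Spec_get_fp_correlation character_stats character_prediction out) := by unfold Spec_get_fp_correlation; infer_instance

-- ===== CLAIM (what is proved, stated in full; the proofs are below) =====
def Claim_equal_get_fp_correlation : Prop := ∀ (character_stats : List (Int × List (Int × List Int))) (character_prediction : List (Int × List (Int × Int))), Dom_get_fp_correlation character_stats character_prediction → Pre_get_fp_correlation character_stats character_prediction → Spec_get_fp_correlation character_stats character_prediction (get_fp_correlation character_stats character_prediction)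

-- ===== LEMMAS AND PROOFS =====

-- canonical form both ports reduce to
def pvCanon (character_stats : List (Int × List (Int × List Int))) (character_prediction : List (Int × List (Int × Int))) : List (Int × List (Int × List Int)) :=
  let S : PySem.Dict Int (List (Int × List Int)) := PySem.Dict.ofList character_stats
  let P : PySem.Dict Int (List (Int × Int)) := PySem.Dict.ofList character_prediction
  let ks : List Int := PySem.List.sorted S.keys (fun x => x) false
  ks.map (fun c =>
    (c, ks.map (fun c2 =>
      (c2, ((PySem.Dict.ofList (S.getD c [])).items.filter
              (fun p => decide (PySem.List.pyGet? p.2 (-2) = some 1))).map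
             (fun p => (PySem.Dict.ofList (P.getD c2 [])).getD p.1 0)))))

theorem pv_get?_modify {ν : Type} (d : PySem.Dict Int ν) (k x : Int) (d0 : ν) (f : ν → ν) :
    (d.modify k d0 f).get? x = if x = k then some (f (d.getD k d0)) else d.get? x := by
  simp [PySem.Dict.modify, PySem.Dict.get?_insert]

theorem pv_get?_of_mem_keys {ν : Type} (d : PySem.Dict Int ν) (k : Int) (d0 : ν)
    (h : k ∈ d.keys) : d.get? k = some (d.getD k d0) := by
  rcases hg : d.get? k with _ | v
  · exact absurd ((PySem.Dict.get?_eq_none_iff_not_mem_keys d k).mp hg h).elim id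
  · rw [PySem.Dict.getD_eq_get?_getD, hg]; rfl

theorem pv_keys_modify_mem {ν : Type} (d : PySem.Dict Int ν) (k : Int) (d0 : ν) (f : ν → ν)
    (h : k ∈ d.keys) : (d.modify k d0 f).keys = d.keys := by
  rw [PySem.Dict.keys_modify, PySem.Dict.keys_insert_of_contains]
  exact (PySem.Dict.contains_iff_mem_keys d k).mpr h

-- innermost cond-loop on an inner dict: one append per key of ks
theorem pv_inner_getD (ks : List Int) (g : Int → Int) :
    ∀ (d : PySem.Dict Int (List Int)) (x : Int), ks.Nodup →
    (ks.foldl (fun i c' => i.modify c' [] (fun l => l ++ [g c'])) d).getD x [] =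
      d.getD x [] ++ (if x ∈ ks then [g x] else []) := by
  induction ks with
  | nil => intro d x _; simp
  | cons c t ih =>
    intro d x hnd
    simp only [List.foldl_cons]
    rw [ih _ x (List.nodup_cons.mp hnd).2]
    rw [PySem.Dict.getD_modify]
    by_cases hx : x = c
    · subst hx
      simp [List.nodup_cons.mp hnd]
    · simp only [if_neg hx, List.mem_cons]
      by_cases hxt : x ∈ t <;> simp [hxt, hx]

theorem pv_inner_keys (ks : List Int) (g : Int → Int) :
    ∀ (d : PySem.Dict Int (List Int)), (∀ c ∈ ks, c ∈ d.keys) →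
    (ks.foldl (fun i c' => i.modify c' [] (fun l => l ++ [g c'])) d).keys = d.keys := by
  induction ks with
  | nil => intro d _; rfl
  | cons c t ih =>
    intro d h
    simp only [List.foldl_cons]
    rw [ih _ (fun c' hc' => by
      rw [pv_keys_modify_mem d c [] _ (h c (List.mem_cons_self))]
      exact h c' (List.mem_cons_of_mem _ hc'))]
    exact pv_keys_modify_mem d c [] _ (h c (List.mem_cons_self))

-- the frame loop on an inner dict
theorem pv_frames_getD {α : Type} (fs : List α) (cond : α → Prop) [DecidablePred cond]
    (ks : List Int) (v : Int → α → Int) :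
    ∀ (i : PySem.Dict Int (List Int)) (x : Int), ks.Nodup →
    (fs.foldl (fun i p => if cond p then
        ks.foldl (fun i c' => i.modify c' [] (fun l => l ++ [v c' p])) i else i) i).getD x [] =
      i.getD x [] ++ (if x ∈ ks then (fs.filter (fun p => decide (cond p))).map (v x) else []) := by
  induction fs with
  | nil => intro i x _; simp
  | cons p t ih =>
    intro i x hnd
    simp only [List.foldl_cons]
    by_cases hp : cond p
    · rw [if_pos hp, ih _ x hnd, pv_inner_getD ks _ i x hnd]
      by_cases hx : x ∈ ks <;> simp [hx, hp]
    · rw [if_neg hp, ih _ x hnd]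
      by_cases hx : x ∈ ks <;> simp [hx, hp]

theorem pv_frames_keys {α : Type} (fs : List α) (cond : α → Prop) [DecidablePred cond]
    (ks : List Int) (v : Int → α → Int) :
    ∀ (i : PySem.Dict Int (List Int)), (∀ c ∈ ks, c ∈ i.keys) →
    (fs.foldl (fun i p => if cond p then
        ks.foldl (fun i c' => i.modify c' [] (fun l => l ++ [v c' p])) i else i) i).keys = i.keys := by
  induction fs with
  | nil => intro i _; rfl
  | cons p t ih =>
    intro i h
    simp only [List.foldl_cons]
    by_cases hp : cond p
    · rw [if_pos hp, ih _ (fun c hc => by rw [pv_inner_keys ks _ i h]; exact h c hc),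
        pv_inner_keys ks _ i h]
    · rw [if_neg hp, ih _ h]

-- cond-loop of modifies all at the same outer key c
theorem pv_condloop (ks : List Int) (F : Int → PySem.Dict Int (List Int) → PySem.Dict Int (List Int)) :
    ∀ (r : PySem.Dict Int (PySem.Dict Int (List Int))) (c : Int), c ∈ r.keys →
    ((ks.foldl (fun r c' => r.modify c PySem.Dict.empty (fun i => F c' i)) r).get? =
      fun x => if x = c then some (ks.foldl (fun i c' => F c' i) (r.getD c PySem.Dict.empty)) else r.get? x)
    ∧ (ks.foldl (fun r c' => r.modify c PySem.Dict.empty (fun i => F c' i)) r).keys = r.keys := by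
  induction ks with
  | nil =>
    intro r c hc
    refine ⟨funext fun x => ?_, rfl⟩
    by_cases hx : x = c
    · subst hx; simp [pv_get?_of_mem_keys r x PySem.Dict.empty hc]
    · simp [hx]
  | cons a t ih =>
    intro r c hc
    simp only [List.foldl_cons]
    have hkeys := pv_keys_modify_mem r c PySem.Dict.empty (fun i => F a i) hc
    obtain ⟨ihg, ihk⟩ := ih (r.modify c PySem.Dict.empty (fun i => F a i)) c (hkeys ▸ hc)
    refine ⟨funext fun x => ?_, by rw [ihk, hkeys]⟩
    rw [congrFun ihg x, PySem.Dict.getD_modify_self]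
    by_cases hx : x = c
    · simp [hx]
    · simp [hx, pv_get?_modify]

-- the frame loop on the outer dict only changes the entry at c
theorem pv_outer_frames {α : Type} (fs : List α) (cond : α → Prop) [DecidablePred cond]
    (ks : List Int) (v : Int → α → Int) :
    ∀ (r : PySem.Dict Int (PySem.Dict Int (List Int))) (c : Int), c ∈ r.keys →
    ((fs.foldl (fun r p => if cond p then
        ks.foldl (fun r c' => r.modify c PySem.Dict.empty (fun i =>
          i.modify c' [] (fun l => l ++ [v c' p]))) r else r) r).get? =
      fun x => if x = c then
        some (fs.foldl (fun i p => if cond p then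
          ks.foldl (fun i c' => i.modify c' [] (fun l => l ++ [v c' p])) i else i)
          (r.getD c PySem.Dict.empty))
      else r.get? x)
    ∧ (fs.foldl (fun r p => if cond p then
        ks.foldl (fun r c' => r.modify c PySem.Dict.empty (fun i =>
          i.modify c' [] (fun l => l ++ [v c' p]))) r else r) r).keys = r.keys := by
  induction fs with
  | nil =>
    intro r c hc
    refine ⟨funext fun x => ?_, rfl⟩
    by_cases hx : x = c
    · subst hx; simp [pv_get?_of_mem_keys r x PySem.Dict.empty hc]
    · simp [hx]
  | cons p t ih =>
    intro r c hc
    simp only [List.foldl_cons]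
    by_cases hp : cond p
    · simp only [if_pos hp]
      obtain ⟨cg, ck⟩ := pv_condloop ks (fun c' i => i.modify c' [] (fun l => l ++ [v c' p])) r c hc
      obtain ⟨ihg, ihk⟩ := ih _ c (ck ▸ hc)
      refine ⟨funext fun x => ?_, by rw [ihk, ck]⟩
      rw [congrFun ihg x]
      have hD : (ks.foldl (fun r c' => r.modify c PySem.Dict.empty
          (fun i => i.modify c' [] (fun l => l ++ [v c' p]))) r).getD c PySem.Dict.empty =
          ks.foldl (fun i c' => i.modify c' [] (fun l => l ++ [v c' p])) (r.getD c PySem.Dict.empty) := by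
        rw [PySem.Dict.getD_eq_get?_getD, congrFun cg c, if_pos rfl]; rfl
      by_cases hx : x = c
      · subst hx; simp [hD]
      · simp [hx, congrFun cg x]
    · simp only [if_neg hp]
      exact ih r c hc

-- fold of fresh inserts (used for res0)
theorem pv_insert_fold_get? {ν : Type} (l : List Int) (v : ν) :
    ∀ (r : PySem.Dict Int ν) (x : Int), l.Nodup →
    (l.foldl (fun r c => r.insert c v) r).get? x = if x ∈ l then some v else r.get? x := by
  induction l with
  | nil => intro r x _; simp
  | cons c t ih =>
    intro r x hnd
    simp only [List.foldl_cons]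
    rw [ih _ x (List.nodup_cons.mp hnd).2, PySem.Dict.get?_insert]
    by_cases hx : x = c
    · subst hx; simp [(List.nodup_cons.mp hnd).1]
    · by_cases hxt : x ∈ t <;> simp [hxt, hx]

theorem pv_set_update_disj (l : List Int) :
    ∀ (s : PySem.Set Int), l.Nodup → (∀ x ∈ l, x ∉ s) → PySem.Set.update s l = s ++ l := by
  induction l with
  | nil => intro s _ _; simp [PySem.Set.update]
  | cons a t ih =>
    intro s hnd h
    simp only [PySem.Set.update, List.foldl_cons]
    have hadd : PySem.Set.add s a = s ++ [a] := by
      simp [PySem.Set.add, PySem.Set.contains, h a List.mem_cons_self]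
    rw [show List.foldl PySem.Set.add (PySem.Set.add s a) t = PySem.Set.update (PySem.Set.add s a) t from rfl,
      hadd, ih (s ++ [a]) (List.nodup_cons.mp hnd).2]
    · simp
    · intro x hx
      simp only [List.mem_append, List.mem_singleton]
      rintro (hs | rfl)
      · exact h x (List.mem_cons_of_mem _ hx) hs
      · exact (List.nodup_cons.mp hnd).1 hx

-- the outer character loop: entries are filled independently
theorem pv_chars_fold (step : PySem.Dict Int (PySem.Dict Int (List Int)) → Int → PySem.Dict Int (PySem.Dict Int (List Int)))
    (Φ : Int → PySem.Dict Int (List Int) → PySem.Dict Int (List Int))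
    (hstep : ∀ r c, c ∈ r.keys →
      ((step r c).get? = fun x => if x = c then some (Φ c (r.getD c PySem.Dict.empty)) else r.get? x)
      ∧ (step r c).keys = r.keys)
    (l : List Int) :
    ∀ (r : PySem.Dict Int (PySem.Dict Int (List Int))), l.Nodup → (∀ c ∈ l, c ∈ r.keys) →
    ((l.foldl step r).get? = fun x => if x ∈ l then some (Φ x (r.getD x PySem.Dict.empty)) else r.get? x)
    ∧ (l.foldl step r).keys = r.keys := by
  induction l with
  | nil => intro r _ _; exact ⟨funext fun x => by simp, rfl⟩
  | cons a t ih =>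
    intro r hnd hmem
    simp only [List.foldl_cons]
    obtain ⟨sg, sk⟩ := hstep r a (hmem a List.mem_cons_self)
    obtain ⟨ihg, ihk⟩ := ih (step r a) (List.nodup_cons.mp hnd).2
      (fun c hc => sk ▸ hmem c (List.mem_cons_of_mem _ hc))
    refine ⟨funext fun x => ?_, by rw [ihk, sk]⟩
    rw [congrFun ihg x]
    by_cases hxt : x ∈ t
    · have hxa : x ≠ a := fun h => (List.nodup_cons.mp hnd).1 (h ▸ hxt)
      have : (step r a).getD x PySem.Dict.empty = r.getD x PySem.Dict.empty := by
        rw [PySem.Dict.getD_eq_get?_getD, congrFun sg x, if_neg hxa, ← PySem.Dict.getD_eq_get?_getD]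
      simp [hxt, this]
    · rw [if_neg hxt, congrFun sg x]
      by_cases hxa : x = a
      · subst hxa; simp
      · simp [hxa, hxt]

-- A reduces to the canonical form
theorem pv_A_canon (cs : List (Int × List (Int × List Int))) (cp : List (Int × List (Int × Int))) :
    get_fp_correlation cs cp = pvCanon cs cp := by
  unfold get_fp_correlation pvCanon
  simp only []
  set S : PySem.Dict Int (List (Int × List Int)) := PySem.Dict.ofList cs with hS
  set P : PySem.Dict Int (List (Int × Int)) := PySem.Dict.ofList cp with hP
  set ks : List Int := PySem.List.sorted S.keys (fun x => x) false with hks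
  have hnd : ks.Nodup :=
    ((PySem.List.sorted_perm S.keys (fun x => x) false).nodup_iff).mpr (PySem.Dict.nodup_keys_ofList cs)
  -- inner0
  set inner0 : PySem.Dict Int (List Int) :=
    ks.foldl (fun inner c' => inner.insert c' ([] : List Int)) PySem.Dict.empty with hinner0
  have hinner0_keys : inner0.keys = ks := by
    rw [hinner0, PySem.Dict.keys_foldl_insert ks (fun _ _ => ([] : List Int)) PySem.Dict.empty]
    rw [pv_set_update_disj ks _ hnd (by intro x hx; simp [PySem.Dict.keys_empty])]
    simp [PySem.Dict.keys_empty]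
  have hinner0_getD : ∀ x, inner0.getD x [] = [] := by
    intro x
    rw [hinner0, PySem.Dict.getD_eq_get?_getD, pv_insert_fold_get? ks ([] : List Int) PySem.Dict.empty x hnd]
    by_cases hx : x ∈ ks <;> simp [hx, PySem.Dict.get?_empty]
  -- res0
  set res0 : PySem.Dict Int (PySem.Dict Int (List Int)) :=
    ks.foldl (fun r c => r.insert c inner0) PySem.Dict.empty with hres0
  have hres0_get? : ∀ x, res0.get? x = if x ∈ ks then some inner0 else none := by
    intro x
    rw [hres0, pv_insert_fold_get? ks inner0 PySem.Dict.empty x hnd, PySem.Dict.get?_empty]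
  have hres0_keys : res0.keys = ks := by
    rw [hres0, PySem.Dict.keys_foldl_insert ks (fun _ _ => inner0) PySem.Dict.empty]
    rw [pv_set_update_disj ks _ hnd (by intro x hx; simp [PySem.Dict.keys_empty])]
    simp [PySem.Dict.keys_empty]
  have hres0_getD : ∀ x ∈ ks, res0.getD x PySem.Dict.empty = inner0 := by
    intro x hx
    rw [PySem.Dict.getD_eq_get?_getD, hres0_get? x, if_pos hx]; rfl
  -- step characterization
  set v : Int → (Int × List Int) → Int :=
    fun c' p => (PySem.Dict.ofList (P.getD c' [])).getD p.1 0 with hv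
  set cond : (Int × List Int) → Prop := fun p => PySem.List.pyGet? p.2 (-2) = some 1 with hcond
  set Φ : Int → PySem.Dict Int (List Int) → PySem.Dict Int (List Int) :=
    fun c i => (PySem.Dict.ofList (S.getD c [])).items.foldl (fun i p => if cond p then
      ks.foldl (fun i c' => i.modify c' [] (fun l => l ++ [v c' p])) i else i) i with hΦ
  set step : PySem.Dict Int (PySem.Dict Int (List Int)) → Int → PySem.Dict Int (PySem.Dict Int (List Int)) :=
    fun r c => (PySem.Dict.ofList (S.getD c [])).items.foldl (fun r p =>
      if cond p then
        ks.foldl (fun r c' => r.modify c PySem.Dict.empty (fun i =>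
          i.modify c' [] (fun l => l ++ [v c' p]))) r
      else r) r with hstep
  obtain ⟨hg, hk⟩ := pv_chars_fold step Φ
    (fun r c hc => pv_outer_frames (PySem.Dict.ofList (S.getD c [])).items cond ks v r c hc)
    ks res0 hnd (fun c hc => hres0_keys ▸ hc)
  set res : PySem.Dict Int (PySem.Dict Int (List Int)) := ks.foldl step res0 with hres
  have hres_keys : res.keys = ks := by rw [hres, hk, hres0_keys]
  have hres_nodup : res.keys.Nodup := hres_keys ▸ hnd
  -- final items
  rw [PySem.Dict.items_eq_map_keys res hres_nodup PySem.Dict.empty, hres_keys, List.map_map]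
  apply List.map_congr_left
  intro c hc
  have hres_getD : res.getD c PySem.Dict.empty = Φ c inner0 := by
    rw [PySem.Dict.getD_eq_get?_getD, hres, congrFun hg c, if_pos hc, hres0_getD c hc]; rfl
  simp only [Function.comp_apply, hres_getD]
  -- inner dict for c
  have hΦkeys : (Φ c inner0).keys = ks := by
    rw [hΦ]
    rw [pv_frames_keys (PySem.Dict.ofList (S.getD c [])).items cond ks v inner0
      (fun c' hc' => hinner0_keys ▸ hc')]
    exact hinner0_keys
  have hΦnodup : (Φ c inner0).keys.Nodup := hΦkeys ▸ hnd
  rw [PySem.Dict.items_eq_map_keys (Φ c inner0) hΦnodup [], hΦkeys]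
  apply congrArg
  apply List.map_congr_left
  intro c2 hc2
  have : (Φ c inner0).getD c2 [] =
      ((PySem.Dict.ofList (S.getD c [])).items.filter (fun p => decide (cond p))).map (v c2) := by
    rw [hΦ, pv_frames_getD (PySem.Dict.ofList (S.getD c [])).items cond ks v inner0 c2 hnd,
      hinner0_getD c2, if_pos hc2, List.nil_append]
  rw [this]

-- B-side: the cache/result fold, characterized by induction on the key list
theorem pv_cache_fold (rowF : List Int → PySem.Dict Int (List Int))
    (fpD : Int → List Int)
    (copyF : PySem.Dict Int (List Int) → PySem.Dict Int (List Int)) :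
    ∀ (l : List Int) (cache : PySem.Dict (List Int) (PySem.Dict Int (List Int)))
      (res : PySem.Dict Int (PySem.Dict Int (List Int))),
    l.Nodup → (∀ ci ∈ l, res.contains ci = false) →
    (∀ k r, cache.get? k = some r → r = rowF k) →
    (l.foldl (fun st ci =>
        let frames := fpD ci
        let cache' := if st.1.contains frames then st.1 else st.1.insert frames (rowF frames)
        (cache', st.2.insert ci (copyF (cache'.getD frames PySem.Dict.empty))))
      (cache, res)).2.items
      = res.items ++ l.map (fun ci => (ci, copyF (rowF (fpD ci)))) := by
  intro l
  induction l with
  | nil => intro cache res _ _ _; simp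
  | cons c t ih =>
    intro cache res hnd hfresh hinv
    simp only [List.foldl_cons]
    set frames := fpD c with hframes
    by_cases hc : cache.contains frames
    · -- cache hit: the cached row is rowF frames by the invariant
      have hsome : ∃ r, cache.get? frames = some r := by
        rcases hg : cache.get? frames with _ | r
        · rw [PySem.Dict.get?_eq_none_iff_contains] at hg
          rw [hg] at hc; exact absurd hc (by simp)
        · exact ⟨r, rfl⟩
      obtain ⟨r, hr⟩ := hsome
      have hrow : cache.getD frames PySem.Dict.empty = rowF frames := by
        rw [PySem.Dict.getD_eq_get?_getD, hr]
        exact hinv frames r hr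
      simp only [if_pos hc, hrow]
      rw [ih cache (res.insert c (copyF (rowF frames))) (List.nodup_cons.mp hnd).2
        (fun ci hci => by
          rw [PySem.Dict.contains_insert]
          have : ci ≠ c := fun h => (List.nodup_cons.mp hnd).1 (h ▸ hci)
          simp [this, hfresh ci (List.mem_cons_of_mem _ hci)])
        hinv]
      rw [PySem.Dict.items_insert_of_not_contains _ _ (hfresh c List.mem_cons_self)]
      simp [hframes]
    · -- cache miss: insert the freshly built row
      have hrow : (cache.insert frames (rowF frames)).getD frames PySem.Dict.empty = rowF frames := by
        rw [PySem.Dict.getD_insert]; simp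
      simp only [if_neg hc, hrow]
      rw [ih (cache.insert frames (rowF frames)) (res.insert c (copyF (rowF frames)))
        (List.nodup_cons.mp hnd).2
        (fun ci hci => by
          rw [PySem.Dict.contains_insert]
          have : ci ≠ c := fun h => (List.nodup_cons.mp hnd).1 (h ▸ hci)
          simp [this, hfresh ci (List.mem_cons_of_mem _ hci)])
        (fun k r hk => by
          rw [PySem.Dict.get?_insert] at hk
          by_cases hkf : k = frames
          · rw [if_pos hkf] at hk
            cases hk; exact hkf ▸ rfl
          · rw [if_neg hkf] at hk
            exact hinv k r hk)]
      rw [PySem.Dict.items_insert_of_not_contains _ _ (hfresh c List.mem_cons_self)]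
      simp [hframes]

-- B reduces to the canonical form
theorem pv_B_canon (cs : List (Int × List (Int × List Int))) (cp : List (Int × List (Int × Int))) :
    get_fp_correlation_alt cs cp = pvCanon cs cp := by
  unfold get_fp_correlation_alt pvCanon
  simp only []
  set S : PySem.Dict Int (List (Int × List Int)) := PySem.Dict.ofList cs with hS
  set P : PySem.Dict Int (List (Int × Int)) := PySem.Dict.ofList cp with hP
  set ks : List Int := PySem.List.sorted S.keys (fun x => x) false with hks
  have hnd : ks.Nodup :=
    ((PySem.List.sorted_perm S.keys (fun x => x) false).nodup_iff).mpr (PySem.Dict.nodup_keys_ofList cs)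
  -- the FP-frame map: a fold of fresh inserts over distinct keys
  set fpf : Int → List Int := fun ci =>
    ((PySem.Dict.ofList (S.getD ci [])).items.filter
        (fun p => PySem.List.pyGet? p.2 (-2) = some 1)).map (fun p => p.1) with hfpf
  set fp : PySem.Dict Int (List Int) :=
    ks.foldl (fun d ci => d.insert ci (fpf ci)) PySem.Dict.empty with hfp
  have hfp_items : fp.items = ks.map (fun ci => (ci, fpf ci)) := by
    rw [hfp, PySem.Dict.items_foldl_insert_fresh ks (fun ci => ci) (fun ci => fpf ci)
      PySem.Dict.empty (by intro a _; exact PySem.Dict.contains_empty a) (by simpa using hnd)]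
    simp [show (PySem.Dict.empty : PySem.Dict Int (List Int)).items = [] from rfl]
  have hfp_nodup : fp.keys.Nodup := by
    simp only [PySem.Dict.keys, hfp_items, List.map_map]
    show (List.map (fun ci : Int => ci) ks).Nodup
    simpa using hnd
  have hfp_getD : ∀ ci ∈ ks, fp.getD ci [] = fpf ci := by
    intro ci hci
    have hmem : (ci, fpf ci) ∈ fp.items := by
      rw [hfp_items]; exact List.mem_map_of_mem hci
    exact PySem.Dict.getD_of_mem_items fp hmem hfp_nodup []
  -- the row builder and the copy
  set rowF : List Int → PySem.Dict Int (List Int) := fun frames =>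
    ks.foldl (fun row cc => row.insert cc
      (frames.map (fun f => (PySem.Dict.ofList (P.getD cc [])).getD f 0)))
      PySem.Dict.empty with hrowF
  set copyF : PySem.Dict Int (List Int) → PySem.Dict Int (List Int) := fun d =>
    d.items.foldl (fun d q => d.insert q.1 q.2) PySem.Dict.empty with hcopyF
  have hrow_items : ∀ frames, (rowF frames).items =
      ks.map (fun cc => (cc, frames.map (fun f => (PySem.Dict.ofList (P.getD cc [])).getD f 0))) := by
    intro frames
    rw [hrowF]
    rw [PySem.Dict.items_foldl_insert_fresh ks (fun cc => cc)
      (fun cc => frames.map (fun f => (PySem.Dict.ofList (P.getD cc [])).getD f 0))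
      PySem.Dict.empty (by intro a _; exact PySem.Dict.contains_empty a) (by simpa using hnd)]
    simp [show (PySem.Dict.empty : PySem.Dict Int (List Int)).items = [] from rfl]
  have hrow_nodup : ∀ frames, (rowF frames).keys.Nodup := by
    intro frames
    simp only [PySem.Dict.keys, hrow_items, List.map_map]
    show (List.map (fun cc : Int => cc) ks).Nodup
    simpa using hnd
  have hcopy_items : ∀ d : PySem.Dict Int (List Int), d.keys.Nodup → (copyF d).items = d.items := by
    intro d hd
    rw [hcopyF]
    rw [PySem.Dict.items_foldl_insert_fresh d.items (fun q => q.1) (fun q => q.2)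
      PySem.Dict.empty (by intro a _; exact PySem.Dict.contains_empty a.1) hd]
    simp [show (PySem.Dict.empty : PySem.Dict Int (List Int)).items = [] from rfl]
  -- the main fold
  have hfold := pv_cache_fold rowF (fun ci => fp.getD ci []) copyF ks
    PySem.Dict.empty PySem.Dict.empty hnd
    (by intro ci _; exact PySem.Dict.contains_empty ci)
    (by intro k r h; rw [PySem.Dict.get?_empty] at h; cases h)
  simp only [show (PySem.Dict.empty : PySem.Dict Int (PySem.Dict Int (List Int))).items = [] from rfl, List.nil_append] at hfold
  refine Eq.trans (congrArg (List.map (fun q : Int × PySem.Dict Int (List Int) => (q.1, q.2.items))) hfold) ?_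
  rw [List.map_map]
  apply List.map_congr_left
  intro c hc
  simp only [Function.comp_apply]
  rw [hfp_getD c hc, hcopy_items (rowF (fpf c)) (hrow_nodup (fpf c)), hrow_items (fpf c)]
  apply congrArg
  apply List.map_congr_left
  intro c2 _
  rw [hfpf]
  simp [List.map_map]

-- ===== VERDICT (by name: the statement is the Claim_ definition above) =====
theorem get_fp_correlation_spec : Claim_equal_get_fp_correlation := by
  intro cs cp _ _
  unfold Spec_get_fp_correlation
  rw [pv_A_canon cs cp, pv_B_canon cs cp]
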